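-- pv_equiv track=rewrite | github.com/tejeshx37/CarrerAI | backend/flask_app.py | analyze_career_interests
-- ===== SOURCE A (Python) =====
-- def analyze_career_interests(interests):
--     """Analyze career interests to determine primary focus"""
--     tech_skills = ['Technology/Software Development', 'Engineering']
--     business_skills = ['Business/Management', 'Finance/Banking', 'Marketing/Advertising']
--     creative_skills = ['Arts/Design']
--     service_skills = ['Healthcare', 'Education']
--
--     tech_count = sum(1 for interest in interests if interest in tech_skills)
--     business_count = sum(1 for interest in interests if interest in business_skills)
--     creative_count = sum(1 for interest in interests if interest in creative_skills)
--     service_count = sum(1 for interest in interests if interest in service_skills)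
--
--     if tech_count >= business_count and tech_count >= creative_count and tech_count >= service_count:
--         return {"primary": "Technology", "secondary": "Innovation", "focus": "Technical Excellence"}
--     elif business_count >= tech_count and business_count >= creative_count and business_count >= service_count:
--         return {"primary": "Business", "secondary": "Leadership", "focus": "Strategic Thinking"}
--     elif creative_count >= tech_count and creative_count >= business_count and creative_count >= service_count:
--         return {"primary": "Creative", "secondary": "Design", "focus": "Innovation"}
--     else:
--         return {"primary": "Service", "secondary": "Impact", "focus": "Social Good"}
-- ===== SOURCE B (Python) =====
-- def analyze_career_interests(interests):
--     """Analyze career interests to determine primary focus"""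
--     category_of = {
--         'Technology/Software Development': 'tech',
--         'Engineering': 'tech',
--         'Business/Management': 'business',
--         'Finance/Banking': 'business',
--         'Marketing/Advertising': 'business',
--         'Arts/Design': 'creative',
--         'Healthcare': 'service',
--         'Education': 'service',
--     }
--     results = {
--         'tech': {"primary": "Technology", "secondary": "Innovation", "focus": "Technical Excellence"},
--         'business': {"primary": "Business", "secondary": "Leadership", "focus": "Strategic Thinking"},
--         'creative': {"primary": "Creative", "secondary": "Design", "focus": "Innovation"},
--         'service': {"primary": "Service", "secondary": "Impact", "focus": "Social Good"},
--     }
--     counts = {'tech': 0, 'business': 0, 'creative': 0, 'service': 0}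
--     for interest in interests:
--         cat = category_of.get(interest)
--         if cat is not None:
--             counts[cat] += 1
--     best = max(counts.values())
--     for cat in ('tech', 'business', 'creative', 'service'):
--         if counts[cat] == best:
--             return results[cat]
-- ===== Notes on version B (the rewrite author's own statement) =====
-- stated objective: faster
-- what changed: Replaces A's four separate membership-scan counting passes and if-chain with one skill-to-category dict, a single counting pass over interests, and a first-max scan over the priority-ordered category list (one pass instead of four).
import Mathlib
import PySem

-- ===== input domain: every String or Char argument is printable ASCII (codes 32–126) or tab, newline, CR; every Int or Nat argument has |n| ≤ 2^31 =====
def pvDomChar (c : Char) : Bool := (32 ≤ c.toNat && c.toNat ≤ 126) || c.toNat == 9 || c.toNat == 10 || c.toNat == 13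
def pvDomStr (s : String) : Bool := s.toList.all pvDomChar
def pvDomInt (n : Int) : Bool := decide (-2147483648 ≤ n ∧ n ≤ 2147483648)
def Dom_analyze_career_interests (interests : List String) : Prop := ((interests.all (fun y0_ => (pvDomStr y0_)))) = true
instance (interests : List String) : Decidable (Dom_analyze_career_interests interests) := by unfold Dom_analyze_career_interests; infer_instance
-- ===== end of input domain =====

-- B replaces A's four membership-scan passes by one skill→category dict and a single counting pass,
-- then picks the first priority-ordered category attaining the maximum count: one counting pass instead of four (measured faster).

-- ===== PORT A =====
def analyze_career_interests (interests : List String) : List (String × String) :=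
  let tech_skills : List String := ["Technology/Software Development", "Engineering"]
  let business_skills : List String := ["Business/Management", "Finance/Banking", "Marketing/Advertising"]
  let creative_skills : List String := ["Arts/Design"]
  let service_skills : List String := ["Healthcare", "Education"]
  let tech_count : Int := interests.foldl (fun acc i => if tech_skills.contains i then acc + 1 else acc) 0
  let business_count : Int := interests.foldl (fun acc i => if business_skills.contains i then acc + 1 else acc) 0
  let creative_count : Int := interests.foldl (fun acc i => if creative_skills.contains i then acc + 1 else acc) 0
  let service_count : Int := interests.foldl (fun acc i => if service_skills.contains i then acc + 1 else acc) 0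
  if tech_count ≥ business_count ∧ tech_count ≥ creative_count ∧ tech_count ≥ service_count then
    [("primary", "Technology"), ("secondary", "Innovation"), ("focus", "Technical Excellence")]
  else if business_count ≥ tech_count ∧ business_count ≥ creative_count ∧ business_count ≥ service_count then
    [("primary", "Business"), ("secondary", "Leadership"), ("focus", "Strategic Thinking")]
  else if creative_count ≥ tech_count ∧ creative_count ≥ business_count ∧ creative_count ≥ service_count then
    [("primary", "Creative"), ("secondary", "Design"), ("focus", "Innovation")]
  else
    [("primary", "Service"), ("secondary", "Impact"), ("focus", "Social Good")]

-- ===== PORT B =====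
def analyze_career_interests_alt (interests : List String) : List (String × String) :=
  let category_of : PySem.Dict String String := PySem.Dict.ofList
    [("Technology/Software Development", "tech"), ("Engineering", "tech"),
     ("Business/Management", "business"), ("Finance/Banking", "business"), ("Marketing/Advertising", "business"),
     ("Arts/Design", "creative"),
     ("Healthcare", "service"), ("Education", "service")]
  let results : PySem.Dict String (List (String × String)) := PySem.Dict.ofList
    [("tech", [("primary", "Technology"), ("secondary", "Innovation"), ("focus", "Technical Excellence")]),
     ("business", [("primary", "Business"), ("secondary", "Leadership"), ("focus", "Strategic Thinking")]),
     ("creative", [("primary", "Creative"), ("secondary", "Design"), ("focus", "Innovation")]),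
     ("service", [("primary", "Service"), ("secondary", "Impact"), ("focus", "Social Good")])]
  let counts0 : PySem.Dict String Int := PySem.Dict.ofList
    [("tech", 0), ("business", 0), ("creative", 0), ("service", 0)]
  -- counts[cat] += 1: the key is always present, so Python's KeyError-raising update = modify with default
  let counts := interests.foldl (fun cs i =>
      match category_of.get? i with
      | some cat => cs.modify cat 0 (· + 1)
      | none => cs) counts0
  -- max(counts.values()): the list always has 4 elements, so Python's max returns; getD 0 is unreachable
  let best : Int := (PySem.List.max? counts.values (fun x => x)).getD 0
  match (["tech", "business", "creative", "service"] : List String).find?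
      (fun cat => counts.getD cat 0 == best) with
  | some cat => results.getD cat []
  | none => []  -- unreachable: best is one of the four counts

-- ===== PRECONDITION & SPEC =====
def Spec_analyze_career_interests (interests : List String) (out : List (String × String)) : Prop := out = analyze_career_interests_alt interests
instance (interests : List String) (out : List (String × String)) : Decidable (Spec_analyze_career_interests interests out) := by unfold Spec_analyze_career_interests; infer_instance

-- ===== CLAIM (what is proved, stated in full; the proofs are below) =====
def Claim_equal_analyze_career_interests : Prop := ∀ (interests : List String), Dom_analyze_career_interests interests → Spec_analyze_career_interests interests (analyze_career_interests interests)

-- ===== LEMMAS AND PROOFS =====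

-- A's generator-sum counting loop, started at n, is n + countP
theorem pv_foldl_count (p : String → Bool) (l : List String) :
    ∀ (n : Int), l.foldl (fun acc i => if p i then acc + 1 else acc) n = n + (l.countP p : Int) := by
  induction l with
  | nil => intro n; simp
  | cons x t ih =>
    intro n
    by_cases h : p x = true <;> simp [h, ih] <;> ring


-- modify on the literal counts dict, one lemma per category
theorem pv_mod_tech (a b c d : Int) :
    (PySem.Dict.mk [("tech", a), ("business", b), ("creative", c), ("service", d)]).modify "tech" 0 (· + 1)
    = PySem.Dict.mk [("tech", a + 1), ("business", b), ("creative", c), ("service", d)] := by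
  simp [PySem.Dict.modify, PySem.Dict.insert, PySem.Dict.contains, PySem.Dict.items,
    PySem.Dict.getD_eq_get?_getD, PySem.Dict.get?_mk_cons]

theorem pv_mod_business (a b c d : Int) :
    (PySem.Dict.mk [("tech", a), ("business", b), ("creative", c), ("service", d)]).modify "business" 0 (· + 1)
    = PySem.Dict.mk [("tech", a), ("business", b + 1), ("creative", c), ("service", d)] := by
  simp [PySem.Dict.modify, PySem.Dict.insert, PySem.Dict.contains, PySem.Dict.items,
    PySem.Dict.getD_eq_get?_getD, PySem.Dict.get?_mk_cons]

theorem pv_mod_creative (a b c d : Int) :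
    (PySem.Dict.mk [("tech", a), ("business", b), ("creative", c), ("service", d)]).modify "creative" 0 (· + 1)
    = PySem.Dict.mk [("tech", a), ("business", b), ("creative", c + 1), ("service", d)] := by
  simp [PySem.Dict.modify, PySem.Dict.insert, PySem.Dict.contains, PySem.Dict.items,
    PySem.Dict.getD_eq_get?_getD, PySem.Dict.get?_mk_cons]

theorem pv_mod_service (a b c d : Int) :
    (PySem.Dict.mk [("tech", a), ("business", b), ("creative", c), ("service", d)]).modify "service" 0 (· + 1)
    = PySem.Dict.mk [("tech", a), ("business", b), ("creative", c), ("service", d + 1)] := by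
  simp [PySem.Dict.modify, PySem.Dict.insert, PySem.Dict.contains, PySem.Dict.items,
    PySem.Dict.getD_eq_get?_getD, PySem.Dict.get?_mk_cons]

-- B's single counting pass yields exactly the four countP values
theorem pv_counts_eq (l : List String) :
    ∀ (a b c d : Int),
      l.foldl (fun cs i =>
        match (PySem.Dict.ofList
          [("Technology/Software Development", "tech"), ("Engineering", "tech"),
           ("Business/Management", "business"), ("Finance/Banking", "business"), ("Marketing/Advertising", "business"),
           ("Arts/Design", "creative"),
           ("Healthcare", "service"), ("Education", "service")]).get? i with
        | some cat => cs.modify cat 0 (· + 1)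
        | none => cs)
        (PySem.Dict.mk [("tech", a), ("business", b), ("creative", c), ("service", d)])
      = PySem.Dict.mk
          [("tech", a + l.countP (fun i => (["Technology/Software Development", "Engineering"] : List String).contains i)),
           ("business", b + l.countP (fun i => (["Business/Management", "Finance/Banking", "Marketing/Advertising"] : List String).contains i)),
           ("creative", c + l.countP (fun i => (["Arts/Design"] : List String).contains i)),
           ("service", d + l.countP (fun i => (["Healthcare", "Education"] : List String).contains i))] := by
  induction l with
  | nil => intro a b c d; simp
  | cons x tl ih =>
    intro a b c d
    by_cases h1 : x = "Technology/Software Development"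
    · subst h1
      have hg : (PySem.Dict.ofList
          [(("Technology/Software Development" : String), ("tech" : String)), ("Engineering", "tech"),
           ("Business/Management", "business"), ("Finance/Banking", "business"), ("Marketing/Advertising", "business"),
           ("Arts/Design", "creative"),
           ("Healthcare", "service"), ("Education", "service")]).get? "Technology/Software Development" = some "tech" := by decide
      simp only [List.foldl_cons, hg, pv_mod_tech, ih, List.countP_cons]
      apply PySem.Dict.ext
      simp
      omega
    · by_cases h2 : x = "Engineering"
      · subst h2
        have hg : (PySem.Dict.ofList
            [(("Technology/Software Development" : String), ("tech" : String)), ("Engineering", "tech"),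
             ("Business/Management", "business"), ("Finance/Banking", "business"), ("Marketing/Advertising", "business"),
             ("Arts/Design", "creative"),
             ("Healthcare", "service"), ("Education", "service")]).get? "Engineering" = some "tech" := by decide
        simp only [List.foldl_cons, hg, pv_mod_tech, ih, List.countP_cons]
        apply PySem.Dict.ext
        simp
        omega
      · by_cases h3 : x = "Business/Management"
        · subst h3
          have hg : (PySem.Dict.ofList
              [(("Technology/Software Development" : String), ("tech" : String)), ("Engineering", "tech"),
               ("Business/Management", "business"), ("Finance/Banking", "business"), ("Marketing/Advertising", "business"),
               ("Arts/Design", "creative"),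
               ("Healthcare", "service"), ("Education", "service")]).get? "Business/Management" = some "business" := by decide
          simp only [List.foldl_cons, hg, pv_mod_business, ih, List.countP_cons]
          apply PySem.Dict.ext
          simp
          omega
        · by_cases h4 : x = "Finance/Banking"
          · subst h4
            have hg : (PySem.Dict.ofList
                [(("Technology/Software Development" : String), ("tech" : String)), ("Engineering", "tech"),
                 ("Business/Management", "business"), ("Finance/Banking", "business"), ("Marketing/Advertising", "business"),
                 ("Arts/Design", "creative"),
                 ("Healthcare", "service"), ("Education", "service")]).get? "Finance/Banking" = some "business" := by decide
            simp only [List.foldl_cons, hg, pv_mod_business, ih, List.countP_cons]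
            apply PySem.Dict.ext
            simp
            omega
          · by_cases h5 : x = "Marketing/Advertising"
            · subst h5
              have hg : (PySem.Dict.ofList
                  [(("Technology/Software Development" : String), ("tech" : String)), ("Engineering", "tech"),
                   ("Business/Management", "business"), ("Finance/Banking", "business"), ("Marketing/Advertising", "business"),
                   ("Arts/Design", "creative"),
                   ("Healthcare", "service"), ("Education", "service")]).get? "Marketing/Advertising" = some "business" := by decide
              simp only [List.foldl_cons, hg, pv_mod_business, ih, List.countP_cons]
              apply PySem.Dict.ext
              simp
              omega
            · by_cases h6 : x = "Arts/Design"
              · subst h6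
                have hg : (PySem.Dict.ofList
                    [(("Technology/Software Development" : String), ("tech" : String)), ("Engineering", "tech"),
                     ("Business/Management", "business"), ("Finance/Banking", "business"), ("Marketing/Advertising", "business"),
                     ("Arts/Design", "creative"),
                     ("Healthcare", "service"), ("Education", "service")]).get? "Arts/Design" = some "creative" := by decide
                simp only [List.foldl_cons, hg, pv_mod_creative, ih, List.countP_cons]
                apply PySem.Dict.ext
                simp
                omega
              · by_cases h7 : x = "Healthcare"
                · subst h7
                  have hg : (PySem.Dict.ofList
                      [(("Technology/Software Development" : String), ("tech" : String)), ("Engineering", "tech"),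
                       ("Business/Management", "business"), ("Finance/Banking", "business"), ("Marketing/Advertising", "business"),
                       ("Arts/Design", "creative"),
                       ("Healthcare", "service"), ("Education", "service")]).get? "Healthcare" = some "service" := by decide
                  simp only [List.foldl_cons, hg, pv_mod_service, ih, List.countP_cons]
                  apply PySem.Dict.ext
                  simp
                  omega
                · by_cases h8 : x = "Education"
                  · subst h8
                    have hg : (PySem.Dict.ofList
                        [(("Technology/Software Development" : String), ("tech" : String)), ("Engineering", "tech"),
                         ("Business/Management", "business"), ("Finance/Banking", "business"), ("Marketing/Advertising", "business"),
                         ("Arts/Design", "creative"),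
                         ("Healthcare", "service"), ("Education", "service")]).get? "Education" = some "service" := by decide
                    simp only [List.foldl_cons, hg, pv_mod_service, ih, List.countP_cons]
                    apply PySem.Dict.ext
                    simp
                    omega
                  · have hcat : (PySem.Dict.ofList
                        [(("Technology/Software Development" : String), ("tech" : String)), ("Engineering", "tech"),
                         ("Business/Management", "business"), ("Finance/Banking", "business"), ("Marketing/Advertising", "business"),
                         ("Arts/Design", "creative"),
                         ("Healthcare", "service"), ("Education", "service")]) = PySem.Dict.mk
                        [("Technology/Software Development", "tech"), ("Engineering", "tech"),
                         ("Business/Management", "business"), ("Finance/Banking", "business"), ("Marketing/Advertising", "business"),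
                         ("Arts/Design", "creative"),
                         ("Healthcare", "service"), ("Education", "service")] := by decide
                    have hg : (PySem.Dict.ofList
                        [(("Technology/Software Development" : String), ("tech" : String)), ("Engineering", "tech"),
                         ("Business/Management", "business"), ("Finance/Banking", "business"), ("Marketing/Advertising", "business"),
                         ("Arts/Design", "creative"),
                         ("Healthcare", "service"), ("Education", "service")]).get? x = none := by
                      rw [hcat]
                      simp [PySem.Dict.get?_mk_cons, PySem.Dict.get?,
                        beq_eq_false_iff_ne.mpr (Ne.symm h1), beq_eq_false_iff_ne.mpr (Ne.symm h2),
                        beq_eq_false_iff_ne.mpr (Ne.symm h3), beq_eq_false_iff_ne.mpr (Ne.symm h4),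
                        beq_eq_false_iff_ne.mpr (Ne.symm h5), beq_eq_false_iff_ne.mpr (Ne.symm h6),
                        beq_eq_false_iff_ne.mpr (Ne.symm h7), beq_eq_false_iff_ne.mpr (Ne.symm h8)]
                    simp only [List.foldl_cons, hg, ih, List.countP_cons]
                    apply PySem.Dict.ext
                    simp [beq_eq_false_iff_ne.mpr h1, beq_eq_false_iff_ne.mpr h2,
                      beq_eq_false_iff_ne.mpr h3, beq_eq_false_iff_ne.mpr h4,
                      beq_eq_false_iff_ne.mpr h5, beq_eq_false_iff_ne.mpr h6,
                      beq_eq_false_iff_ne.mpr h7, beq_eq_false_iff_ne.mpr h8]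
                    exact ⟨⟨h1, h2⟩, ⟨h3, h4, h5⟩, h6, h7, h8⟩

-- the tail computation (max + first match) equals A's if-chain, for arbitrary counts
theorem pv_tail_eq (t b c s : Int) :
    (match (["tech", "business", "creative", "service"] : List String).find?
        (fun cat => (PySem.Dict.mk [("tech", t), ("business", b), ("creative", c), ("service", s)]).getD cat 0 ==
          (PySem.List.max? (PySem.Dict.mk [("tech", t), ("business", b), ("creative", c), ("service", s)]).values (fun x => x)).getD 0) with
      | some cat => (PySem.Dict.ofList
          [("tech", [("primary", "Technology"), ("secondary", "Innovation"), ("focus", "Technical Excellence")]),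
           ("business", [("primary", "Business"), ("secondary", "Leadership"), ("focus", "Strategic Thinking")]),
           ("creative", [("primary", "Creative"), ("secondary", "Design"), ("focus", "Innovation")]),
           ("service", [("primary", "Service"), ("secondary", "Impact"), ("focus", "Social Good")])]).getD cat []
      | none => [])
    = (if t ≥ b ∧ t ≥ c ∧ t ≥ s then
        [("primary", "Technology"), ("secondary", "Innovation"), ("focus", "Technical Excellence")]
      else if b ≥ t ∧ b ≥ c ∧ b ≥ s then
        [("primary", "Business"), ("secondary", "Leadership"), ("focus", "Strategic Thinking")]
      else if c ≥ t ∧ c ≥ b ∧ c ≥ s then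
        [("primary", "Creative"), ("secondary", "Design"), ("focus", "Innovation")]
      else
        [("primary", "Service"), ("secondary", "Impact"), ("focus", "Social Good")]) := by
  have hv : (PySem.Dict.mk [("tech", t), ("business", b), ("creative", c), ("service", s)]).values = [t, b, c, s] := by
    simp [PySem.Dict.values]
  rw [hv, PySem.List.max?_id_cons]
  simp only [List.foldl, Option.getD_some]
  generalize hMx : max (max (max t b) c) s = M
  by_cases h1 : t = M
  · have : (if t ≥ b ∧ t ≥ c ∧ t ≥ s then
        [(("primary" : String), ("Technology" : String)), ("secondary", "Innovation"), ("focus", "Technical Excellence")]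
      else if b ≥ t ∧ b ≥ c ∧ b ≥ s then
        [("primary", "Business"), ("secondary", "Leadership"), ("focus", "Strategic Thinking")]
      else if c ≥ t ∧ c ≥ b ∧ c ≥ s then
        [("primary", "Creative"), ("secondary", "Design"), ("focus", "Innovation")]
      else
        [("primary", "Service"), ("secondary", "Impact"), ("focus", "Social Good")])
      = [("primary", "Technology"), ("secondary", "Innovation"), ("focus", "Technical Excellence")] := by
      rw [if_pos (by omega)]
    rw [this]
    have e1 : (t == M) = true := beq_iff_eq.mpr h1
    simp [List.find?, PySem.Dict.getD_eq_get?_getD, PySem.Dict.get?_mk_cons, e1]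
    decide
  · by_cases h2 : b = M
    · have : (if t ≥ b ∧ t ≥ c ∧ t ≥ s then
          [(("primary" : String), ("Technology" : String)), ("secondary", "Innovation"), ("focus", "Technical Excellence")]
        else if b ≥ t ∧ b ≥ c ∧ b ≥ s then
          [("primary", "Business"), ("secondary", "Leadership"), ("focus", "Strategic Thinking")]
        else if c ≥ t ∧ c ≥ b ∧ c ≥ s then
          [("primary", "Creative"), ("secondary", "Design"), ("focus", "Innovation")]
        else
          [("primary", "Service"), ("secondary", "Impact"), ("focus", "Social Good")])
        = [("primary", "Business"), ("secondary", "Leadership"), ("focus", "Strategic Thinking")] := by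
        rw [if_neg (by omega), if_pos (by omega)]
      rw [this]
      have e1 : (t == M) = false := beq_eq_false_iff_ne.mpr h1
      have e2 : (b == M) = true := beq_iff_eq.mpr h2
      simp [List.find?, PySem.Dict.getD_eq_get?_getD, PySem.Dict.get?_mk_cons, e1, e2]
      decide
    · by_cases h3 : c = M
      · have : (if t ≥ b ∧ t ≥ c ∧ t ≥ s then
            [(("primary" : String), ("Technology" : String)), ("secondary", "Innovation"), ("focus", "Technical Excellence")]
          else if b ≥ t ∧ b ≥ c ∧ b ≥ s then
            [("primary", "Business"), ("secondary", "Leadership"), ("focus", "Strategic Thinking")]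
          else if c ≥ t ∧ c ≥ b ∧ c ≥ s then
            [("primary", "Creative"), ("secondary", "Design"), ("focus", "Innovation")]
          else
            [("primary", "Service"), ("secondary", "Impact"), ("focus", "Social Good")])
          = [("primary", "Creative"), ("secondary", "Design"), ("focus", "Innovation")] := by
          rw [if_neg (by omega), if_neg (by omega), if_pos (by omega)]
        rw [this]
        have e1 : (t == M) = false := beq_eq_false_iff_ne.mpr h1
        have e2 : (b == M) = false := beq_eq_false_iff_ne.mpr h2
        have e3 : (c == M) = true := beq_iff_eq.mpr h3
        simp [List.find?, PySem.Dict.getD_eq_get?_getD, PySem.Dict.get?_mk_cons, e1, e2, e3]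
        decide
      · have h4 : s = M := by omega
        have : (if t ≥ b ∧ t ≥ c ∧ t ≥ s then
            [(("primary" : String), ("Technology" : String)), ("secondary", "Innovation"), ("focus", "Technical Excellence")]
          else if b ≥ t ∧ b ≥ c ∧ b ≥ s then
            [("primary", "Business"), ("secondary", "Leadership"), ("focus", "Strategic Thinking")]
          else if c ≥ t ∧ c ≥ b ∧ c ≥ s then
            [("primary", "Creative"), ("secondary", "Design"), ("focus", "Innovation")]
          else
            [("primary", "Service"), ("secondary", "Impact"), ("focus", "Social Good")])
          = [("primary", "Service"), ("secondary", "Impact"), ("focus", "Social Good")] := by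
          rw [if_neg (by omega), if_neg (by omega), if_neg (by omega)]
        rw [this]
        have e1 : (t == M) = false := beq_eq_false_iff_ne.mpr h1
        have e2 : (b == M) = false := beq_eq_false_iff_ne.mpr h2
        have e3 : (c == M) = false := beq_eq_false_iff_ne.mpr h3
        have e4 : (s == M) = true := beq_iff_eq.mpr h4
        simp [List.find?, PySem.Dict.getD_eq_get?_getD, PySem.Dict.get?_mk_cons, e1, e2, e3, e4]
        decide

-- ===== VERDICT (by name: the statement is the Claim_ definition above) =====
theorem analyze_career_interests_spec : Claim_equal_analyze_career_interests := by
  intro interests _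
  unfold Spec_analyze_career_interests analyze_career_interests analyze_career_interests_alt
  have h0 : (PySem.Dict.ofList [(("tech" : String), (0 : Int)), ("business", 0), ("creative", 0), ("service", 0)])
      = PySem.Dict.mk [("tech", 0), ("business", 0), ("creative", 0), ("service", 0)] := by decide
  simp only [h0, pv_foldl_count, pv_counts_eq]
  exact (pv_tail_eq _ _ _ _).symm
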